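-- pv_equiv track=rewrite | github.com/Cognameton/nova | src/nova/prompt/validator.py | _strip_wrapping_quotes
-- ===== SOURCE A (Python) =====
-- def _strip_wrapping_quotes(text: str) -> str:
--     stripped = text.strip()
--     quote_pairs = [('"', '"'), ("'", "'"), ("“", "”")]
--     changed = True
--     while changed and stripped:
--         changed = False
--         for start, end in quote_pairs:
--             if stripped.startswith(start) and stripped.endswith(end) and len(stripped) > 1:
--                 inner = stripped[len(start):-len(end)].strip()
--                 if inner:
--                     stripped = inner
--                     changed = True
--                     break
--     return stripped
-- ===== SOURCE B (Python) =====
-- _QUOTE_PAIRS = [('"', '"'), ("'", "'"), ("\u201c", "\u201d")]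
--
--
-- def _strip_wrapping_quotes(text: str) -> str:
--     s = text.strip()
--     if len(s) > 1:
--         for start, end in _QUOTE_PAIRS:
--             if s[0] == start and s[-1] == end:
--                 inner = s[1:-1].strip()
--                 if inner:
--                     return _strip_wrapping_quotes(inner)
--     return s
-- ===== Notes on version B (the rewrite author's own statement) =====
-- stated objective: simpler
-- what changed: Replaces the while-loop fixpoint driven by a mutated boolean flag with direct recursion that peels one quote layer per call, and replaces the startswith/endswith/len-slice pair test by first/last-character comparison under a single length check.
import Mathlib
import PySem

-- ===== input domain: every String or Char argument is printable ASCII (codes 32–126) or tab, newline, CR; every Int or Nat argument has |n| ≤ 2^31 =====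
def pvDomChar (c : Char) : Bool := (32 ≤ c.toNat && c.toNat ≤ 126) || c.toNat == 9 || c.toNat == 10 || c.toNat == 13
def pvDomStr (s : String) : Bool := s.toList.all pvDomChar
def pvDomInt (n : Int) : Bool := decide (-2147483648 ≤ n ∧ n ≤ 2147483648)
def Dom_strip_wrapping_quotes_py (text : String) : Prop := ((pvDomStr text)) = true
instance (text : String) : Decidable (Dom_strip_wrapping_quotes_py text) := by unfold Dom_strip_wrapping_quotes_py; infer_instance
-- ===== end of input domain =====

-- B replaces A's while-loop fixpoint (driven by a mutated boolean flag) by direct recursion peeling one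
-- quote layer per call, testing the first/last characters directly (objective: simpler).

-- helper lemmas the ports need for termination (cited in decreasing_by, so they live up here)
theorem strip_length_le (l : List Char) : (PySem.Chars.strip l).length ≤ l.length := by
  unfold PySem.Chars.strip PySem.Chars.lstrip PySem.Chars.rstrip
  have h1 : (List.dropWhile PySem.Chars.isspace l).length ≤ l.length :=
    List.length_dropWhile_le _ _
  have h2 : (List.dropWhile PySem.Chars.isspace (List.dropWhile PySem.Chars.isspace l).reverse).length
      ≤ (List.dropWhile PySem.Chars.isspace l).reverse.length :=
    List.length_dropWhile_le _ _
  simp only [List.length_reverse] at h2 ⊢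
  omega

theorem slice_len_eq (l : List Char) :
    (PySem.Chars.slice l (some 1) (some (-1))).length = l.length - 1 - min 1 l.length := by
  have h2 : PySem.List.clampIdx l.length (1 : Int) = min 1 l.length := by
    simpa using PySem.List.clampIdx_natCast l.length 1
  rw [PySem.Chars.slice_eq_listSlice, PySem.List.length_slice, PySem.List.clampIdx_neg_one, h2]

theorem str_ne_empty_pos (s : String) (h : s ≠ "") : 1 ≤ s.toList.length := by
  cases hl : s.toList with
  | nil => exact absurd (by rw [← String.ofList_toList (s := s), hl]) h
  | cons a t => simp

theorem stripSlice_shrinks (s inner : String)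
    (hinner : inner = PySem.Str.strip (PySem.Str.slice s (some 1) (some (-1))))
    (hne : inner ≠ "") : inner.toList.length + 2 ≤ s.toList.length := by
  have htl : inner.toList = PySem.Chars.strip (PySem.Chars.slice s.toList (some 1) (some (-1))) := by
    rw [hinner]; simp [PySem.Str.toList_strip, PySem.Str.slice]
  have h1 : inner.toList.length ≤ (PySem.Chars.slice s.toList (some 1) (some (-1))).length := by
    rw [htl]; exact strip_length_le _
  have h2 := slice_len_eq s.toList
  have h3 := str_ne_empty_pos inner hne
  omega

-- ===== PORT A =====
-- quote_pairs = [('"', '"'), ("'", "'"), ("“", "”")]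
def pyQuotePairs : List (String × String) := [("\"", "\""), ("'", "'"), ("“", "”")]

-- the body of the 'for start, end in quote_pairs' loop: 'some inner' = a pair matched with
-- non-empty inner (break with changed = True); 'none' = the for loop fell through (changed stays False)
def pyFindInner (pairs : List (String × String)) (stripped : String) : Option String :=
  match pairs with
  | [] => none
  | (st, en) :: rest =>
    if PySem.Str.startswith stripped st && PySem.Str.endswith stripped en
        && decide (1 < PySem.Str.len stripped) then
      let inner := PySem.Str.strip
        (PySem.Str.slice stripped (some (PySem.Str.len st)) (some (-(PySem.Str.len en))))
      if inner ≠ "" then some inner else pyFindInner rest stripped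
    else pyFindInner rest stripped

theorem pyFindInner_shrinks (pairs : List (String × String))
    (hp : ∀ p ∈ pairs, PySem.Str.len p.1 = 1 ∧ PySem.Str.len p.2 = 1)
    (s inner : String) (h : pyFindInner pairs s = some inner) :
    inner.toList.length + 2 ≤ s.toList.length := by
  induction pairs with
  | nil => simp [pyFindInner] at h
  | cons p rest ih =>
    obtain ⟨st, en⟩ := p
    have hst := (hp (st, en) (by simp)).1
    have hen := (hp (st, en) (by simp)).2
    simp only [pyFindInner, hst, hen] at h
    split at h
    · split at h
      · next hne =>
        rw [Option.some_inj] at h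
        subst h
        exact stripSlice_shrinks s _ rfl hne
      · exact ih (fun q hq => hp q (List.mem_cons_of_mem _ hq)) h
    · exact ih (fun q hq => hp q (List.mem_cons_of_mem _ hq)) h

theorem pyQuotePairs_len : ∀ p ∈ pyQuotePairs, PySem.Str.len p.1 = 1 ∧ PySem.Str.len p.2 = 1 := by
  decide

-- the 'while changed and stripped:' loop
def pyWhile (stripped : String) : String :=
  if stripped = "" then stripped
  else
    match h : pyFindInner pyQuotePairs stripped with
    | some inner => pyWhile inner
    | none => stripped
termination_by stripped.toList.length
decreasing_by
  have := pyFindInner_shrinks pyQuotePairs pyQuotePairs_len stripped inner h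
  omega

def strip_wrapping_quotes_py (text : String) : String :=
  pyWhile (PySem.Str.strip text)

-- ===== PORT B =====
-- _QUOTE_PAIRS (single characters)
def altQuotePairs : List (Char × Char) := [('"', '"'), ('\'', '\''), ('“', '”')]

-- the 'for start, end in _QUOTE_PAIRS' loop of B: 'some inner' = the recursive call's argument
def altFindInner (pairs : List (Char × Char)) (s : String) : Option String :=
  match pairs with
  | [] => none
  | (st, en) :: rest =>
    if PySem.Str.pyGet? s 0 == some st && PySem.Str.pyGet? s (-1) == some en then
      let inner := PySem.Str.strip (PySem.Str.slice s (some 1) (some (-1)))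
      if inner ≠ "" then some inner else altFindInner rest s
    else altFindInner rest s

theorem altFindInner_shrinks (pairs : List (Char × Char)) (s inner : String)
    (h : altFindInner pairs s = some inner) :
    inner.toList.length + 2 ≤ s.toList.length := by
  induction pairs with
  | nil => simp [altFindInner] at h
  | cons p rest ih =>
    obtain ⟨st, en⟩ := p
    simp only [altFindInner] at h
    split at h
    · split at h
      · next hne =>
        rw [Option.some_inj] at h
        subst h
        exact stripSlice_shrinks s _ rfl hne
      · exact ih h
    · exact ih h

def strip_wrapping_quotes_py_alt (text : String) : String :=
  let s := PySem.Str.strip text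
  if 1 < PySem.Str.len s then
    match h : altFindInner altQuotePairs s with
    | some inner => strip_wrapping_quotes_py_alt inner
    | none => s
  else s
termination_by text.toList.length
decreasing_by
  have h1 := altFindInner_shrinks altQuotePairs (PySem.Str.strip text) inner h
  have h2 := strip_length_le text.toList
  have h3 : (PySem.Str.strip text).toList = PySem.Chars.strip text.toList :=
    PySem.Str.toList_strip text
  rw [h3] at h1
  omega

-- ===== PRECONDITION & SPEC =====
def Spec_strip_wrapping_quotes_py (text : String) (out : String) : Prop := out = strip_wrapping_quotes_py_alt text
instance (text : String) (out : String) : Decidable (Spec_strip_wrapping_quotes_py text out) := by unfold Spec_strip_wrapping_quotes_py; infer_instance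

-- ===== CLAIM (what is proved, stated in full; the proofs are below) =====
def Claim_equal_strip_wrapping_quotes_py : Prop := ∀ (text : String), Dom_strip_wrapping_quotes_py text → Spec_strip_wrapping_quotes_py text (strip_wrapping_quotes_py text)

-- ===== LEMMAS AND PROOFS =====

-- basic list facts
theorem dropWhile_idem (p : Char → Bool) (l : List Char) :
    List.dropWhile p (List.dropWhile p l) = List.dropWhile p l := by
  rw [List.dropWhile_eq_self_iff]
  intro hl
  have h := List.head?_dropWhile_not p l
  cases hh : (List.dropWhile p l).head? with
  | none =>
    rw [List.head?_eq_none_iff] at hh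
    rw [hh] at hl
    simp at hl
  | some x =>
    rw [hh] at h
    obtain ⟨t, ht⟩ := List.head?_eq_some_iff.mp hh
    simp only [ht] at hl ⊢
    simpa using h

theorem dropWhile_eq_self_of_head? (p : Char → Bool) (l : List Char)
    (h : ∀ x, l.head? = some x → p x = false) : List.dropWhile p l = l := by
  cases l with
  | nil => rfl
  | cons a t => rw [List.dropWhile_cons, h a rfl]; simp

theorem head?_of_prefix (t m : List Char) (x : Char) (hp : t <+: m) (h : t.head? = some x) :
    m.head? = some x := by
  obtain ⟨u, rfl⟩ := hp
  cases t with
  | nil => simp at h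
  | cons a r => simpa using h

theorem rstrip_prefix (m : List Char) : PySem.Chars.rstrip m <+: m := by
  unfold PySem.Chars.rstrip
  rw [← List.reverse_suffix]
  simpa using List.dropWhile_suffix PySem.Chars.isspace

theorem rstrip_idem (l : List Char) :
    PySem.Chars.rstrip (PySem.Chars.rstrip l) = PySem.Chars.rstrip l := by
  unfold PySem.Chars.rstrip
  rw [List.reverse_reverse, dropWhile_idem]

theorem strip_idem (l : List Char) :
    PySem.Chars.strip (PySem.Chars.strip l) = PySem.Chars.strip l := by
  unfold PySem.Chars.strip
  have hm : List.dropWhile PySem.Chars.isspace (PySem.Chars.lstrip l) = PySem.Chars.lstrip l :=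
    dropWhile_idem _ l
  have hl2 : PySem.Chars.lstrip (PySem.Chars.rstrip (PySem.Chars.lstrip l))
      = PySem.Chars.rstrip (PySem.Chars.lstrip l) := by
    unfold PySem.Chars.lstrip
    apply dropWhile_eq_self_of_head?
    intro x hx
    have hxm : (PySem.Chars.lstrip l).head? = some x :=
      head?_of_prefix _ _ _ (rstrip_prefix _) hx
    obtain ⟨t, ht⟩ := List.head?_eq_some_iff.mp hxm
    have := hm
    rw [ht] at this
    by_cases hpx : PySem.Chars.isspace x = true
    · rw [List.dropWhile_cons, if_pos hpx] at this
      have hlen : t.length + 1 ≤ t.length := by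
        calc t.length + 1 = (x :: t).length := by simp
          _ = (List.dropWhile PySem.Chars.isspace t).length := by rw [this]
          _ ≤ t.length := List.length_dropWhile_le _ _
      omega
    · simpa using hpx
  rw [hl2, rstrip_idem]

theorem str_strip_idem (s : String) :
    PySem.Str.strip (PySem.Str.strip s) = PySem.Str.strip s := by
  unfold PySem.Str.strip
  rw [String.toList_ofList, strip_idem]

-- first/last-character characterisations on a two-sided decomposition
theorem two_decomp (l : List Char) (h : 1 < l.length) : ∃ a mid b, l = a :: (mid ++ [b]) := by
  match l, h with
  | a :: t, h =>
    rcases List.eq_nil_or_concat t with rfl | ⟨mid, b, rfl⟩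
    · simp at h
    · exact ⟨a, mid, b, by simp⟩

theorem startswith_decomp (a b : Char) (mid : List Char) (c : Char) :
    PySem.Chars.startswith (a :: (mid ++ [b])) [c] = (c == a) := by
  simp [PySem.Chars.startswith, List.isPrefixOf]

theorem endswith_decomp (a b : Char) (mid : List Char) (d : Char) :
    PySem.Chars.endswith (a :: (mid ++ [b])) [d] = (d == b) := by
  simp [PySem.Chars.endswith, List.isSuffixOf, List.isPrefixOf]

theorem pyGet0_decomp (a b : Char) (mid : List Char) :
    PySem.List.pyGet? (a :: (mid ++ [b])) 0 = some a := by
  have h0 : PySem.List.pyIdx? (a :: (mid ++ [b])).length 0 = some 0 := by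
    unfold PySem.List.pyIdx?
    have hA : (0:Int) ≤ 0 := le_refl 0
    have hB : (0:Int) < ((a :: (mid ++ [b])).length : Int) := by simp; omega
    rw [if_pos hA, if_pos hB]
    rfl
  unfold PySem.List.pyGet?
  rw [h0]
  rfl

theorem pyGetNeg1_decomp (a b : Char) (mid : List Char) :
    PySem.List.pyGet? (a :: (mid ++ [b])) (-1) = some b := by
  have h0 : PySem.List.pyIdx? (a :: (mid ++ [b])).length (-1) = some (mid.length + 1) := by
    unfold PySem.List.pyIdx?
    have hA : ¬ ((0:Int) ≤ -1) := by omega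
    have hB : -((a :: (mid ++ [b])).length : Int) ≤ -1 := by simp
    rw [if_neg hA, if_pos hB]
    congr 1
    simp
  have h1 : (a :: (mid ++ [b]))[mid.length + 1]? = some b := by
    have he : (a :: (mid ++ [b])) = (a :: mid) ++ [b] := by simp
    rw [he]
    have h2 : (a :: mid).length = mid.length + 1 := by simp
    rw [← h2]
    exact List.getElem?_concat_length
  unfold PySem.List.pyGet?
  rw [h0]
  simpa using h1

-- one step of each for loop agrees (the pairs are single characters)
theorem pair_step (c d : Char) (restA : List (String × String)) (restB : List (Char × Char))
    (s : String) (hIH : pyFindInner restA s = altFindInner restB s) :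
    pyFindInner ((String.singleton c, String.singleton d) :: restA) s
      = altFindInner ((c, d) :: restB) s := by
  have hst : PySem.Str.len (String.singleton c) = 1 := by
    simp [PySem.Str.len, String.toList_singleton]
  have hen : PySem.Str.len (String.singleton d) = 1 := by
    simp [PySem.Str.len, String.toList_singleton]
  simp only [pyFindInner, altFindInner, hst, hen]
  by_cases hlen : 1 < s.toList.length
  · obtain ⟨a, mid, b, hdec⟩ := two_decomp s.toList hlen
    have hA : PySem.Str.startswith s (String.singleton c) = (c == a) := by
      rw [PySem.Str.startswith_eq, String.toList_singleton, hdec, startswith_decomp]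
    have hB : PySem.Str.endswith s (String.singleton d) = (d == b) := by
      rw [PySem.Str.endswith_eq, String.toList_singleton, hdec, endswith_decomp]
    have hC : PySem.Str.pyGet? s 0 = some a := by
      unfold PySem.Str.pyGet?
      rw [hdec, PySem.Chars.pyGet?_eq_listPyGet?, pyGet0_decomp]
    have hD : PySem.Str.pyGet? s (-1) = some b := by
      unfold PySem.Str.pyGet?
      rw [hdec, PySem.Chars.pyGet?_eq_listPyGet?, pyGetNeg1_decomp]
    have hE : decide (1 < PySem.Str.len s) = true := by
      simp only [PySem.Str.len, decide_eq_true_iff]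
      exact_mod_cast hlen
    have hcond : (PySem.Str.startswith s (String.singleton c)
          && PySem.Str.endswith s (String.singleton d) && decide (1 < PySem.Str.len s))
        = ((PySem.Str.pyGet? s 0 == some c) && (PySem.Str.pyGet? s (-1) == some d)) := by
      rw [hA, hB, hC, hD, hE]
      cases hca : (c == a) <;> cases hdb : (d == b) <;>
        simp_all [BEq.comm]
    rw [hcond, hIH]
  · have hE : decide (1 < PySem.Str.len s) = false := by
      simp only [PySem.Str.len, decide_eq_false_iff_not]
      omega
    rw [hE]
    simp only [Bool.and_false, Bool.false_eq_true, if_false]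
    have hcase : s.toList.length = 0 ∨ s.toList.length = 1 := by omega
    rcases hcase with h0 | h1
    · have hnil : s.toList = [] := List.length_eq_zero_iff.mp h0
      have hC : PySem.Str.pyGet? s 0 = none := by
        unfold PySem.Str.pyGet?
        rw [hnil]
        rfl
      rw [hC]
      simpa using hIH
    · have hslice : PySem.Str.slice s (some 1) (some (-1)) = "" := by
        have hlen0 : (PySem.Chars.slice s.toList (some 1) (some (-1))).length = 0 := by
          rw [slice_len_eq, h1]
          simp
        have hnil : PySem.Chars.slice s.toList (some 1) (some (-1)) = [] :=
          List.length_eq_zero_iff.mp hlen0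
        unfold PySem.Str.slice
        rw [hnil]
      rw [hslice]
      have hstripnil : PySem.Str.strip "" = "" := rfl
      rw [hstripnil]
      simpa using hIH

theorem eqFind (s : String) : pyFindInner pyQuotePairs s = altFindInner altQuotePairs s := by
  have h1 : pyQuotePairs
      = [(String.singleton '"', String.singleton '"'), (String.singleton '\'', String.singleton '\''),
         (String.singleton '“', String.singleton '”')] := by decide
  rw [h1]
  exact pair_step _ _ _ _ s (pair_step _ _ _ _ s (pair_step _ _ _ _ s rfl))

theorem pyFindInner_stripped (pairs : List (String × String)) (s inner : String)
    (h : pyFindInner pairs s = some inner) : ∃ x, inner = PySem.Str.strip x := by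
  induction pairs with
  | nil => simp [pyFindInner] at h
  | cons p rest ih =>
    obtain ⟨st, en⟩ := p
    simp only [pyFindInner] at h
    split at h
    · split at h
      · exact ⟨_, (Option.some_inj.mp h).symm⟩
      · exact ih h
    · exact ih h

theorem alt_of_empty : strip_wrapping_quotes_py_alt "" = "" := by
  rw [strip_wrapping_quotes_py_alt]
  have h : PySem.Str.strip "" = "" := rfl
  rw [h]
  norm_num [PySem.Str.len]

theorem pyWhile_of_empty : pyWhile "" = "" := by
  rw [pyWhile]
  simp

theorem loop_eq_alt : ∀ (n : Nat) (s : String), s.toList.length ≤ n →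
    PySem.Chars.strip s.toList = s.toList → pyWhile s = strip_wrapping_quotes_py_alt s := by
  intro n
  induction n with
  | zero =>
    intro s hle hs
    have hnil : s.toList = [] := List.length_eq_zero_iff.mp (Nat.le_zero.mp hle)
    have hempty : s = "" := by rw [← String.ofList_toList (s := s), hnil]
    rw [hempty, alt_of_empty, pyWhile_of_empty]
  | succ n ih =>
    intro s hle hs
    by_cases hempty : s = ""
    · rw [hempty, alt_of_empty, pyWhile_of_empty]
    · have hstr : PySem.Str.strip s = s := by
        unfold PySem.Str.strip
        rw [hs, String.ofList_toList]
      rw [pyWhile, if_neg hempty]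
      cases hfi : pyFindInner pyQuotePairs s with
      | none =>
        have halt : altFindInner altQuotePairs s = none := by rw [← eqFind]; exact hfi
        conv_rhs => rw [strip_wrapping_quotes_py_alt]
        simp only [hstr]
        split
        · split
          · next heq =>
            rw [hstr, halt] at heq
            cases heq
          · rfl
        · rfl
      | some inner =>
        have halt : altFindInner altQuotePairs s = some inner := by rw [← eqFind]; exact hfi
        have hlen := altFindInner_shrinks altQuotePairs s inner halt
        have hgt : 1 < PySem.Str.len s := by
          simp only [PySem.Str.len]
          omega
        conv_rhs => rw [strip_wrapping_quotes_py_alt]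
        simp only [hstr]
        rw [if_pos hgt]
        have hinner_str : PySem.Chars.strip inner.toList = inner.toList := by
          obtain ⟨x, hx⟩ := pyFindInner_stripped pyQuotePairs s inner hfi
          rw [hx, PySem.Str.toList_strip, strip_idem]
        split
        · next inner' heq =>
          rw [hstr, halt] at heq
          injection heq with heq'
          subst heq'
          exact ih _ (by omega) hinner_str
        · next heq =>
          rw [hstr, halt] at heq
          cases heq

-- ===== VERDICT (by name: the statement is the Claim_ definition above) =====
theorem strip_wrapping_quotes_py_spec : Claim_equal_strip_wrapping_quotes_py := by
  intro text _
  unfold Spec_strip_wrapping_quotes_py strip_wrapping_quotes_py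
  have h1 : PySem.Chars.strip (PySem.Str.strip text).toList = (PySem.Str.strip text).toList := by
    rw [PySem.Str.toList_strip, strip_idem]
  rw [loop_eq_alt (PySem.Str.strip text).toList.length (PySem.Str.strip text) le_rfl h1]
  conv_lhs => rw [strip_wrapping_quotes_py_alt]
  conv_rhs => rw [strip_wrapping_quotes_py_alt]
  rw [str_strip_idem]
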